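-- pv_equiv track=rewrite | github.com/RaphaellaRoma/Criptoataques | lib/ataques/rsa_franklin_reiter/mensagens_relacionadas.py | expandir_relacao_linear
-- ===== SOURCE A (Python) =====
-- from math import comb
--
-- def expandir_relacao_linear(a: int, b: int, e: int, c: int, n: int | None = None) -> list[int]:
--     """
--     Expande o polinômio (a*x + b)^e - c.
--
--     - Se n=None, retorna coeficientes inteiros exatos.
--     - Se n!=None, retorna coeficientes reduzidos módulo n.
--
--     Retorna os coeficientes em ordem crescente:
--     [c0, c1, c2, ...] representando c0 + c1*x + c2*x^2 + ...
--
--     Args: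
--         a, b: relação linear m2 = a*m1 + b
--         e: expoente público RSA
--         c: cifra associada c2 = m2^e
--         n: módulo RSA
--
--     Returns:
--         list[int]: coeficientes do polinômio.
--     """
--
--     # coercões de tipo (pode vir SymPy ou outro tipo numérico)
--     try:
--         e = int(e)
--     except Exception:
--         raise TypeError("Expoente 'e' não é um inteiro válido.")
--
--     if e < 0:
--         raise ValueError("Expoente 'e' deve ser não-negativo.")
--
--     # evita tentativas de alocar listas gigantescas por segurança
--     if e > 1_000_000:
--         raise ValueError("Expoente 'e' muito grande para expandir o polinômio.")
--
--     coefs = [0] * (e + 1)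
--
--     for k in range(e + 1):
--         # coerciona a/b para int antes de operações repetidas
--         if k == 0:
--             a_int = int(a)
--             b_int = int(b)
--         ak = pow(int(a_int), k, n) if n is not None else (int(a_int) ** k)
--
--         # b^(e-k) mod n
--         bek = pow(int(b_int), e - k, n) if n is not None else (int(b_int) ** (e - k))
--
--         # expansão do binômio: (a*m1 + b)^e = soma(k=0 até e) [comb(e,k) * (a*m1)^k * b^(e-k)]
--         # como estamos construindo o polinômio em m1, o coeficiente do termo m1^k é:
--         coef = comb(e, k) * ak * bek
--         if n is not None:
--             coef %= int(n)
--
--         coefs[k] = int(coef)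
--
--     # subtrai a cifra do termo constante
--     if n is None:
--         coefs[0] -= c
--     else:
--         coefs[0] = (coefs[0] - c) % n
--
--     return coefs
-- ===== SOURCE B (Python) =====
-- def expandir_relacao_linear(a: int, b: int, e: int, c: int, n: int | None = None) -> list[int]:
--     """Expande (a*x + b)^e - c em uma unica passada: coeficiente binomial
--     incremental e potencias corridas de a e b (O(e) operacoes)."""
--     e = int(e)
--     if e < 0:
--         raise ValueError("Expoente 'e' deve ser não-negativo.")
--     if e > 1_000_000:
--         raise ValueError("Expoente 'e' muito grande para expandir o polinômio.")
--     a = int(a)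
--     b = int(b)
--     red = (lambda x: x % n) if n is not None else (lambda x: x)
--
--     # potencias crescentes de b, reduzidas modulo n quando houver modulo
--     bpow = [1] * (e + 1)
--     for i in range(1, e + 1):
--         bpow[i] = red(bpow[i - 1] * b)
--
--     coefs = [0] * (e + 1)
--     comb_ek = 1          # comb(e, k), atualizado incrementalmente
--     apow = 1             # a^k (reduzido), atualizado incrementalmente
--     coefs[0] = red(bpow[e])
--     for k in range(1, e + 1):
--         comb_ek = comb_ek * (e - k + 1) // k
--         apow = red(apow * a)
--         coefs[k] = red(comb_ek * apow * bpow[e - k])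
--
--     coefs[0] = red(coefs[0] - c)
--     return coefs
-- ===== Notes on version B (the rewrite author's own statement) =====
-- stated objective: faster
-- what changed: Replaces per-term math.comb(e,k) and modular-exponentiation calls by an incremental binomial coefficient (C = C*(e-k+1)//k) and running (mod-reduced) powers of a and b, so each coefficient costs O(1) big-int multiplications.
import Mathlib
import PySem

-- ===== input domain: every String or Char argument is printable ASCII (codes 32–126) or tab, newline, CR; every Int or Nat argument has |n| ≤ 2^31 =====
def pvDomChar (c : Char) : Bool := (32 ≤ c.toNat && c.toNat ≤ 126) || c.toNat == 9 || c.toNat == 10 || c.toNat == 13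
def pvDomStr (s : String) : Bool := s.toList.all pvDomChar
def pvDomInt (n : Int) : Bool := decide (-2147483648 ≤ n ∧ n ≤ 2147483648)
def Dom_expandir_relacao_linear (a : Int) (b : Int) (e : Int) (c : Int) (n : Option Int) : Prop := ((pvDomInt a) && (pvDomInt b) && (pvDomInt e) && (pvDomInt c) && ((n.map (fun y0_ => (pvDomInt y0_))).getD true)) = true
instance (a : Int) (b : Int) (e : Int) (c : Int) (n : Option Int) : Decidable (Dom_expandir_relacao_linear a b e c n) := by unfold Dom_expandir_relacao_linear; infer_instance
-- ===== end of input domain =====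

-- B replaces A's per-k comb(e,k) and modular pow calls by an incremental binomial
-- coefficient and running (reduced) powers of a and b, one big-int multiply per term.

-- ===== PORT A =====
-- A: coefs[k] = comb(e,k) * (a^k [mod n]) * (b^(e-k) [mod n]) [mod n]; then coefs[0] -= c [mod n].
def pvAElem (a : Int) (b : Int) (n : Option Int) (en : Nat) (k : Nat) : Int :=
  let ak := match n with
    | some m => PySem.Int.powMod a k m          -- pow(a, k, n)
    | none => a ^ k
  let bek := match n with
    | some m => PySem.Int.powMod b (en - k) m   -- pow(b, e-k, n)
    | none => b ^ (en - k)
  let coef := ((en.choose k : Nat) : Int) * ak * bek   -- math.comb(e, k)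
  match n with
  | some m => PySem.Int.mod coef m
  | none => coef

def expandir_relacao_linear (a : Int) (b : Int) (e : Int) (c : Int) (n : Option Int) : List Int :=
  if e < 0 then []                 -- Python: raise ValueError (excluded by Pre_)
  else if e > 1000000 then []      -- Python: raise ValueError (excluded by Pre_)
  else
    match (List.range (e.toNat + 1)).map (pvAElem a b n e.toNat) with
    | [] => []                                      -- unreachable: range(e+1) is nonempty
    | c0 :: rest =>
      (match n with
       | none => c0 - c
       | some m => PySem.Int.mod (c0 - c) m) :: rest

-- ===== PORT B =====
-- B-side helpers (Source B): red = (x % n) or identity; running powers; incremental comb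
def pvRed (n : Option Int) (x : Int) : Int :=
  match n with
  | some m => PySem.Int.mod x m
  | none => x

-- apow/bpow loops of Source B: pvPowRed n x k is the k-th running (reduced) power of x
def pvPowRed (n : Option Int) (x : Int) : Nat → Int
  | 0 => 1
  | i + 1 => pvRed n (pvPowRed n x i * x)

-- comb_ek of Source B: comb_ek = comb_ek * (e - k + 1) // k, starting from 1
def pvCombInc (e : Int) : Nat → Int
  | 0 => 1
  | k + 1 => PySem.Int.floordiv (pvCombInc e k * (e - ((k : Int) + 1) + 1)) ((k : Int) + 1)

def expandir_relacao_linear_alt (a : Int) (b : Int) (e : Int) (c : Int) (n : Option Int) : List Int :=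
  if e < 0 then []
  else if e > 1000000 then []
  else
    match (List.range (e.toNat + 1)).map
        (fun k => pvRed n (pvCombInc e k * pvPowRed n a k * pvPowRed n b (e.toNat - k))) with
    | [] => []
    | c0 :: rest => pvRed n (c0 - c) :: rest

-- ===== PRECONDITION & SPEC =====
-- Pre_ excludes exactly the inputs where the Python A raises: e < 0 and e > 1_000_000
-- (ValueError) and n = 0 (pow/% with modulus 0: ValueError/ZeroDivisionError).
def Pre_expandir_relacao_linear (a : Int) (b : Int) (e : Int) (c : Int) (n : Option Int) : Prop :=
  0 ≤ e ∧ e ≤ 1000000 ∧ n ≠ some 0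
instance (a : Int) (b : Int) (e : Int) (c : Int) (n : Option Int) : Decidable (Pre_expandir_relacao_linear a b e c n) := by unfold Pre_expandir_relacao_linear; infer_instance

def pvWitness_expandir_relacao_linear : Int × Int × Int × Int × Option Int := (2, 3, 4, 5, some 7)

def Spec_expandir_relacao_linear (a : Int) (b : Int) (e : Int) (c : Int) (n : Option Int) (out : List Int) : Prop := out = expandir_relacao_linear_alt a b e c n
instance (a : Int) (b : Int) (e : Int) (c : Int) (n : Option Int) (out : List Int) : Decidable (Spec_expandir_relacao_linear a b e c n out) := by unfold Spec_expandir_relacao_linear; infer_instance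

-- ===== CLAIM (what is proved, stated in full; the proofs are below) =====
def Claim_equal_expandir_relacao_linear : Prop := ∀ (a : Int) (b : Int) (e : Int) (c : Int) (n : Option Int), Dom_expandir_relacao_linear a b e c n → Pre_expandir_relacao_linear a b e c n → Spec_expandir_relacao_linear a b e c n (expandir_relacao_linear a b e c n)

-- ===== LEMMAS AND PROOFS =====

-- Python % (fmod) respects congruence mod n
theorem pvFmod_congr {x y n : Int} (h : x % n = y % n) : Int.fmod x n = Int.fmod y n := by
  rw [Int.fmod_eq_emod, Int.fmod_eq_emod, h]
  have hd : (n ∣ x) ↔ (n ∣ y) := by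
    rw [Int.dvd_iff_emod_eq_zero, Int.dvd_iff_emod_eq_zero, h]
  by_cases h0 : 0 ≤ n <;> simp [h0, hd]

theorem pvFmod_emod (y m : Int) : Int.fmod y m % m = y % m := by
  rw [Int.fmod_eq_emod]
  split_ifs <;> simp [Int.add_mul_emod_self_left]

theorem pvPowRed_none (x : Int) (k : Nat) : pvPowRed none x k = x ^ k := by
  induction k with
  | zero => simp [pvPowRed]
  | succ i ih => simp [pvPowRed, pvRed, ih, pow_succ]

theorem pvPowRed_some_emod (x m : Int) (k : Nat) :
    pvPowRed (some m) x k % m = x ^ k % m := by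
  induction k with
  | zero => simp [pvPowRed]
  | succ i ih =>
    show Int.fmod (pvPowRed (some m) x i * x) m % m = x ^ (i + 1) % m
    rw [pvFmod_emod, pow_succ, Int.mul_emod, ih, ← Int.mul_emod]

theorem pvCombInc_eq_choose (en k : Nat) (hk : k ≤ en) :
    pvCombInc (en : Int) k = ((en.choose k : Nat) : Int) := by
  induction k with
  | zero => simp [pvCombInc]
  | succ j ih =>
    have hj : j ≤ en := Nat.le_of_succ_le hk
    rw [pvCombInc, ih hj]
    have hsub : (en : Int) - ((j : Int) + 1) + 1 = ((en - j : Nat) : Int) := by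
      omega
    rw [hsub]
    have hnumN : en.choose j * (en - j) = en.choose (j + 1) * (j + 1) :=
      (Nat.choose_succ_right_eq en j).symm
    have hnum : ((en.choose j : Nat) : Int) * ((en - j : Nat) : Int)
        = ((en.choose (j + 1) * (j + 1) : Nat) : Int) := by
      rw [← Nat.cast_mul, hnumN]
    have hden : ((j : Int) + 1) = ((j + 1 : Nat) : Int) := by push_cast; ring
    rw [hnum, hden, PySem.Int.floordiv_natCast]
    rw [Nat.mul_div_cancel _ (Nat.succ_pos j)]

theorem pvMul3_emod_congr (d x y x' y' m : Int) (hx : x % m = x' % m)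
    (hy : y % m = y' % m) : (d * x * y) % m = (d * x' * y') % m := by
  rw [Int.mul_emod, Int.mul_emod d x, hx, hy, ← Int.mul_emod d x', ← Int.mul_emod]

-- the k-th coefficient computed by A equals the one computed by B
theorem pvElem_eq (a b e : Int) (n : Option Int) (en k : Nat)
    (hen : (en : Int) = e) (hk : k ≤ en) :
    pvAElem a b n en k = pvRed n (pvCombInc e k * pvPowRed n a k * pvPowRed n b (en - k)) := by
  subst hen
  cases n with
  | none =>
    simp [pvAElem, pvRed, pvPowRed_none, pvCombInc_eq_choose en k hk]
  | some m =>
    show Int.fmod _ m = Int.fmod _ m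
    apply pvFmod_congr
    rw [pvCombInc_eq_choose en k hk]
    simp only [PySem.Int.powMod, PySem.Int.mod]
    exact pvMul3_emod_congr _ _ _ _ _ m
      (by rw [pvFmod_emod, pvPowRed_some_emod])
      (by rw [pvFmod_emod, pvPowRed_some_emod])

-- ===== VERDICT (by name: the statement is the Claim_ definition above) =====
theorem expandir_relacao_linear_spec : Claim_equal_expandir_relacao_linear := by
  intro a b e c n _ hpre
  obtain ⟨he0, he1, hn⟩ := hpre
  unfold Spec_expandir_relacao_linear expandir_relacao_linear expandir_relacao_linear_alt
  rw [if_neg (by omega), if_neg (by omega), if_neg (by omega), if_neg (by omega)]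
  have hen : ((e.toNat : Nat) : Int) = e := Int.toNat_of_nonneg he0
  have hmap : (List.range (e.toNat + 1)).map (pvAElem a b n e.toNat)
      = (List.range (e.toNat + 1)).map (fun k =>
          pvRed n (pvCombInc e k * pvPowRed n a k * pvPowRed n b (e.toNat - k))) := by
    apply List.map_congr_left
    intro k hk
    exact pvElem_eq a b e n e.toNat k hen (by simpa [Nat.lt_succ_iff] using hk)
  rw [hmap]
  cases (List.range (e.toNat + 1)).map (fun k =>
      pvRed n (pvCombInc e k * pvPowRed n a k * pvPowRed n b (e.toNat - k))) with
  | nil => rfl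
  | cons c0 rest => cases n <;> rfl
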